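-- pv_equiv track=rewrite | github.com/prerial/node.proxy.server | temp/server_python/core/anchor_tables.py | dfs
-- ===== SOURCE A (Python) =====
-- def dfs(graph, node, init, anchors, visited =[]):
--     # Initializing the visited list for every new anchor
--     if init == 0:
--         visited[:] =[]
--     for n in node:
--         if n in graph.keys():
--             if n not in visited and n not in anchors:
--                 visited.append(n)
--                 init = 1
--                 # Recursive call on the dfs function
--                 dfs(graph, graph[n], init, anchors, visited)
--         elif n not in anchors:
--             visited.append(n)
--     return visited
-- ===== SOURCE B (Python) =====
-- def dfs(graph, node, init, anchors, visited=[]):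
--     # Same reset / in-place mutation of the shared visited list as the original.
--     if init == 0:
--         visited[:] = []
--     # Iterative DFS with an explicit stack instead of recursion.
--     stack = list(node)[::-1]
--     while stack:
--         n = stack.pop()
--         if n in graph:
--             if n not in visited and n not in anchors:
--                 visited.append(n)
--                 stack.extend(reversed(list(graph[n])))
--         elif n not in anchors:
--             visited.append(n)
--     return visited
-- ===== Notes on version B (the rewrite author's own statement) =====
-- stated objective: alternative
-- what changed: Replaces the recursive DFS with an iterative explicit-stack loop (children pushed in reverse so pop order preserves A's left-to-right pre-order and pop-time membership checks match A's iteration-time checks).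
import Mathlib
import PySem

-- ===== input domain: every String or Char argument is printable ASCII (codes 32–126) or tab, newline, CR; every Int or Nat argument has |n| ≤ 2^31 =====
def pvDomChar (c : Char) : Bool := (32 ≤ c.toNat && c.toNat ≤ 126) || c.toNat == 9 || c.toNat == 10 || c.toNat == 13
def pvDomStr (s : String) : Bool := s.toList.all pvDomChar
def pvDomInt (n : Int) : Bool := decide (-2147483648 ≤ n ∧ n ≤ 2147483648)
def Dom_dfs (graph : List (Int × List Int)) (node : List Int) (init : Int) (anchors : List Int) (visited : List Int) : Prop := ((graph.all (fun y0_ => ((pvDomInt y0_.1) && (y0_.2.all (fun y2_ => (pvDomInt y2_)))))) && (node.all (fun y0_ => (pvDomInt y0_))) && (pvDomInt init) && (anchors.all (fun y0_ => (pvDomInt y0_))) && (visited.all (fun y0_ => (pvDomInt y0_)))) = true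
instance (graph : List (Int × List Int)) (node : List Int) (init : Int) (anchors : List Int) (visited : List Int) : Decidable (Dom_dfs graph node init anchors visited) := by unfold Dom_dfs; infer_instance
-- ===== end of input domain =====

-- B replaces A's recursive DFS with an iterative explicit-stack loop (same visiting order,
-- same return value); both Pythons mutate `visited` in place in the same way, and the
-- theorems below are about the returned list.

-- ===== PORT A =====

-- number of graph-key occurrences not yet in `visited`: a well-founded measure used only
-- as a totality guard for the two ports (each descent into graph[n] strictly decreases it)
def pvU (graph : List (Int × List Int)) (visited : List Int) : Nat :=
  ((graph.map Prod.fst).filter (fun k => decide (k ∉ visited))).length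

-- literal transliteration of A's recursive body; `fuel` only guards the recursion into
-- graph[n] (fuel = pvU at the top suffices, so the fuel-0 branch is never reached)
def dfsGoA (graph : List (Int × List Int)) (anchors : List Int) :
    Nat → List Int → List Int → List Int
  | _, [], visited => visited
  | fuel, n :: rest, visited =>
    match graph.lookup n with
    | some adj =>
      if n ∉ visited ∧ n ∉ anchors then
        if fuel = 0 then dfsGoA graph anchors 0 rest (visited ++ [n])  -- unreachable totality guard
        else dfsGoA graph anchors fuel rest (dfsGoA graph anchors (fuel - 1) adj (visited ++ [n]))
      else dfsGoA graph anchors fuel rest visited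
    | none =>
      if n ∉ anchors then dfsGoA graph anchors fuel rest (visited ++ [n])
      else dfsGoA graph anchors fuel rest visited
termination_by fuel node _ => (fuel, node.length)
decreasing_by
  all_goals first
    | exact Prod.Lex.right _ (by simp)
    | exact Prod.Lex.left _ _ (by omega)
    | (rename_i hf; subst hf; exact Prod.Lex.right _ (by simp))

def dfs (graph : List (Int × List Int)) (node : List Int) (init : Int) (anchors : List Int) (visited : List Int) : List Int :=
  let v0 := if init = 0 then [] else visited
  dfsGoA graph anchors (pvU graph v0) node v0

-- ===== PORT B =====

-- measure lemmas needed by the stack loop's termination proof (they stay above the port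
-- because `decreasing_by` cites them)
theorem pvFilterLenMono {p q : Int → Bool} (h : ∀ k, p k = true → q k = true) :
    ∀ ks : List Int, (ks.filter p).length ≤ (ks.filter q).length := by
  intro ks
  induction ks with
  | nil => simp
  | cons a t ih =>
    simp only [List.filter_cons]
    cases hp : p a
    · cases q a <;> simp <;> omega
    · rw [h a hp]; simpa using Nat.succ_le_succ ih

theorem pvFilterLenLt {p q : Int → Bool} {n : Int} (h : ∀ k, p k = true → q k = true)
    (hp : p n = false) (hq : q n = true) :
    ∀ ks : List Int, n ∈ ks → (ks.filter p).length < (ks.filter q).length := by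
  intro ks
  induction ks with
  | nil => simp
  | cons a t ih =>
    intro hmem
    simp only [List.filter_cons]
    rcases List.mem_cons.mp hmem with rfl | hmem
    · rw [hp, hq]
      simpa using Nat.lt_succ_of_le (pvFilterLenMono h t)
    · cases hpa : p a
      · cases hqa : q a
        · simpa using ih hmem
        · simpa using Nat.lt_succ_of_lt (ih hmem)
      · rw [h a hpa]; simpa using Nat.succ_lt_succ (ih hmem)

theorem pvKeyMem (graph : List (Int × List Int)) (n : Int)
    (hk : (graph.lookup n).isSome) : n ∈ graph.map Prod.fst := by
  obtain ⟨p, hp, he⟩ := List.lookup_isSome_iff.mp hk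
  have hn : n = p.1 := by simpa using he
  rw [hn]; exact List.mem_map_of_mem hp

theorem pvU_append_key_lt (graph : List (Int × List Int)) (v : List Int) (n : Int)
    (hk : (graph.lookup n).isSome) (hv : n ∉ v) :
    pvU graph (v ++ [n]) < pvU graph v := by
  unfold pvU
  refine pvFilterLenLt (n := n) ?_ ?_ ?_ _ (pvKeyMem graph n hk)
  · intro k hkk
    simp only [decide_eq_true_eq, List.mem_append] at hkk ⊢
    tauto
  · simp
  · simpa using hv

theorem pvU_append_nonkey (graph : List (Int × List Int)) (v : List Int) (n : Int)
    (hk : graph.lookup n = none) : pvU graph (v ++ [n]) = pvU graph v := by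
  unfold pvU
  congr 1
  apply List.filter_congr
  intro k hkmem
  have hne : k ≠ n := by
    rintro rfl
    obtain ⟨p, hp, hfst⟩ := List.mem_map.mp hkmem
    have := List.lookup_eq_none_iff.mp hk p hp
    rw [← hfst] at this
    simp at this
  simp [List.mem_append, hne]

-- literal transliteration of B's loop: the head of the list is the top of the stack
-- (B pushes reversed children and pops from the end; head-first is the same order)
def dfsGoB (graph : List (Int × List Int)) (anchors : List Int) :
    List Int → List Int → List Int
  | [], visited => visited
  | n :: stack, visited =>
    match hl : graph.lookup n with
    | some adj =>
      if h : n ∉ visited ∧ n ∉ anchors then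
        dfsGoB graph anchors (adj ++ stack) (visited ++ [n])
      else dfsGoB graph anchors stack visited
    | none =>
      if n ∉ anchors then dfsGoB graph anchors stack (visited ++ [n])
      else dfsGoB graph anchors stack visited
termination_by stack visited => (pvU graph visited, stack.length)
decreasing_by
  · exact Prod.Lex.left _ _ (pvU_append_key_lt graph visited n (by simp [hl]) h.1)
  · exact Prod.Lex.right _ (by simp)
  · rw [pvU_append_nonkey graph visited n hl]
    exact Prod.Lex.right _ (by simp)
  · exact Prod.Lex.right _ (by simp)

def dfs_alt (graph : List (Int × List Int)) (node : List Int) (init : Int) (anchors : List Int) (visited : List Int) : List Int :=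
  let v0 := if init = 0 then [] else visited
  dfsGoB graph anchors node v0

-- ===== PRECONDITION & SPEC =====
def Spec_dfs (graph : List (Int × List Int)) (node : List Int) (init : Int) (anchors : List Int) (visited : List Int) (out : List Int) : Prop := out = dfs_alt graph node init anchors visited
instance (graph : List (Int × List Int)) (node : List Int) (init : Int) (anchors : List Int) (visited : List Int) (out : List Int) : Decidable (Spec_dfs graph node init anchors visited out) := by unfold Spec_dfs; infer_instance

-- ===== CLAIM (what is proved, stated in full; the proofs are below) =====
def Claim_equal_dfs : Prop := ∀ (graph : List (Int × List Int)) (node : List Int) (init : Int) (anchors : List Int) (visited : List Int), Dom_dfs graph node init anchors visited → Spec_dfs graph node init anchors visited (dfs graph node init anchors visited)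

-- ===== LEMMAS AND PROOFS =====

theorem pvU_append_le (graph : List (Int × List Int)) (v : List Int) (m : Int) :
    pvU graph (v ++ [m]) ≤ pvU graph v := by
  unfold pvU
  apply pvFilterLenMono
  intro k hk
  simp only [decide_eq_true_eq, List.mem_append] at hk ⊢
  tauto

theorem pvU_pos (graph : List (Int × List Int)) (v : List Int) (n : Int)
    (hk : (graph.lookup n).isSome) (hv : n ∉ v) : 1 ≤ pvU graph v := by
  unfold pvU
  have : n ∈ (graph.map Prod.fst).filter (fun k => decide (k ∉ v)) := by
    simp only [List.mem_filter, decide_eq_true_eq]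
    exact ⟨pvKeyMem graph n hk, hv⟩
  exact List.length_pos_of_mem this

-- the loop only extends `visited`, so the measure never grows across a whole run
theorem pvU_goB_le (graph : List (Int × List Int)) (anchors : List Int)
    (stack visited : List Int) :
    pvU graph (dfsGoB graph anchors stack visited) ≤ pvU graph visited := by
  induction stack, visited using dfsGoB.induct graph anchors with
  | case1 v => simp [dfsGoB]
  | case2 n stack v adj hl h ih =>
    rw [dfsGoB, hl]
    simp only [dif_pos h]
    exact le_trans ih (pvU_append_le graph v n)
  | case3 n stack v adj hl h ih =>
    rw [dfsGoB, hl]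
    simpa only [dif_neg h] using ih
  | case4 n stack v hl h ih =>
    rw [dfsGoB, hl]
    rw [if_pos h]
    exact le_of_le_of_eq ih (pvU_append_nonkey graph v n hl)
  | case5 n stack v hl h ih =>
    rw [dfsGoB, hl]
    simpa only [if_neg h] using ih

-- running the loop on stack₁ ++ stack₂ first fully processes stack₁ (and everything it
-- pushes), then stack₂: the key decomposition of the explicit-stack semantics
theorem goB_append_aux (graph : List (Int × List Int)) (anchors : List Int) :
    ∀ N : Nat, ∀ s₁ s₂ v : List Int, pvU graph v ≤ N →
      dfsGoB graph anchors (s₁ ++ s₂) v = dfsGoB graph anchors s₂ (dfsGoB graph anchors s₁ v) := by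
  intro N
  induction N using Nat.strong_induction_on with
  | _ N IH =>
    intro s₁
    induction s₁ with
    | nil => intro s₂ v _; simp [dfsGoB]
    | cons n s₁ ih =>
      intro s₂ v hv
      rw [List.cons_append, dfsGoB, dfsGoB]
      cases hl : graph.lookup n with
      | some adj =>
        by_cases h : n ∉ v ∧ n ∉ anchors
        · simp only [dif_pos h]
          have hlt : pvU graph (v ++ [n]) < pvU graph v :=
            pvU_append_key_lt graph v n (by simp [hl]) h.1
          have hNlt : pvU graph (v ++ [n]) < N := lt_of_lt_of_le hlt hv
          rw [← List.append_assoc]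
          rw [IH _ hNlt (adj ++ s₁) s₂ (v ++ [n]) (le_refl _)]
        · simp only [dif_neg h]
          exact ih s₂ v hv
      | none =>
        by_cases h : n ∉ anchors
        · simp only [if_pos h]
          rw [ih s₂ (v ++ [n]) (by rw [pvU_append_nonkey graph v n hl]; exact hv)]
        · simp only [if_neg h]
          exact ih s₂ v hv

theorem goB_append (graph : List (Int × List Int)) (anchors : List Int)
    (s₁ s₂ v : List Int) :
    dfsGoB graph anchors (s₁ ++ s₂) v = dfsGoB graph anchors s₂ (dfsGoB graph anchors s₁ v) :=
  goB_append_aux graph anchors (pvU graph v) s₁ s₂ v (le_refl _)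

-- main lemma: the recursive traversal with sufficient fuel equals the stack loop
theorem goA_eq_goB (graph : List (Int × List Int)) (anchors : List Int) :
    ∀ fuel : Nat, ∀ node v : List Int, pvU graph v ≤ fuel →
      dfsGoA graph anchors fuel node v = dfsGoB graph anchors node v := by
  intro fuel
  induction fuel using Nat.strong_induction_on with
  | _ fuel IH =>
    intro node
    induction node with
    | nil => intro v _; simp [dfsGoA, dfsGoB]
    | cons n rest ih =>
      intro v hv
      rw [dfsGoA, dfsGoB]
      cases hl : graph.lookup n with
      | some adj =>
        by_cases h : n ∉ v ∧ n ∉ anchors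
        · simp only [if_pos h, dif_pos h]
          have h1 : 1 ≤ pvU graph v := pvU_pos graph v n (by simp [hl]) h.1
          have hfz : ¬ fuel = 0 := by omega
          rw [if_neg hfz]
          have hfn : pvU graph (v ++ [n]) ≤ fuel - 1 := by
            have := pvU_append_key_lt graph v n (by simp [hl]) h.1
            omega
          rw [IH (fuel - 1) (by omega) adj (v ++ [n]) hfn]
          have hwle : pvU graph (dfsGoB graph anchors adj (v ++ [n])) ≤ fuel :=
            le_trans (pvU_goB_le graph anchors adj (v ++ [n])) (by omega)
          rw [ih _ hwle]
          rw [goB_append graph anchors adj rest (v ++ [n])]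
        · simp only [if_neg h, dif_neg h]
          exact ih v hv
      | none =>
        by_cases h : n ∉ anchors
        · simp only [if_pos h]
          exact ih (v ++ [n]) (by rw [pvU_append_nonkey graph v n hl]; exact hv)
        · simp only [if_neg h]
          exact ih v hv

-- ===== VERDICT (by name: the statement is the Claim_ definition above) =====
theorem dfs_spec : Claim_equal_dfs := by
  intro graph node init anchors visited _
  unfold Spec_dfs dfs dfs_alt
  exact goA_eq_goB graph anchors _ node _ (le_refl _)
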